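-- pv_equiv track=rewrite | github.com/wieldphysics/wield-epics-autocas | cas9epics/cas9core/pyepics_backend.py | _relay_value_convert_char_fromPV
-- ===== SOURCE A (Python) =====
-- def _relay_value_convert_char_fromPV(val):
--     try:
--         try:
--             firstnull  = list(val).index(0)
--             cval = ''.join([chr(i) for i in val[:firstnull]])
--         except ValueError:
--             cval = ''.join([chr(i) for i in val])
--         return cval
--     except TypeError:
--         #this error occures with pyepics returns a non-array single character
--         return chr(val)
-- ===== SOURCE B (Python) =====
-- def _relay_value_convert_char_fromPV(val):
--     try:
--         chars = []
--         for i in val: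
--             if i == 0:
--                 break
--             chars.append(chr(i))
--         return ''.join(chars)
--     except TypeError:
--         # non-iterable single character code from pyepics
--         return chr(val)
-- ===== Notes on version B (the rewrite author's own statement) =====
-- stated objective: simpler
-- what changed: B replaces A's two-pass scheme (list(val).index(0) scan, then slice-and-join, with a ValueError retry joining the whole list) by a single pass that breaks at the first null while accumulating characters.
-- outside the precondition, e.g. on _relay_value_convert_char_fromPV([65, -1]): A raises ValueError, B raises ValueError
import Mathlib
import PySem

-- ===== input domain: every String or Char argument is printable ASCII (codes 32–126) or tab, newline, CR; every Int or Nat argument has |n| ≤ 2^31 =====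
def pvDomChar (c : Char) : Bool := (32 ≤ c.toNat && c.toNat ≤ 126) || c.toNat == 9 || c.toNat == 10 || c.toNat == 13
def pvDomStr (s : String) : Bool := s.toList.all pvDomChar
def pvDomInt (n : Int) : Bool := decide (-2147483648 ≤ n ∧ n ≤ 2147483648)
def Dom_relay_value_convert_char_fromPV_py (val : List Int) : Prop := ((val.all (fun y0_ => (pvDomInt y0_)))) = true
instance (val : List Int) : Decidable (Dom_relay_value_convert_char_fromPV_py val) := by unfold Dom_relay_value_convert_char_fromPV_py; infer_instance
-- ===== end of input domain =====

-- B replaces A's two passes (index(0) scan then slice-and-join, with a ValueError retry) by one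
-- accumulator loop that breaks at the first null; objective: simpler, same O(n) cost.


-- ===== PORT A =====
-- chr(i); exact for the codepoints admitted by Pre_ (0 ≤ i ≤ 0x10FFFF, not a surrogate)
def pyChr (i : Int) : Char := Char.ofNat i.toNat

def relay_value_convert_char_fromPV_py (val : List Int) : String :=
  match PySem.List.index? val 0 with
  | some firstnull =>
      String.mk ((PySem.List.slice val none (some (firstnull : Int))).map pyChr)
  | none => String.mk (val.map pyChr)

-- ===== PORT B =====
def relayAltGo : List Int → List Char
  | [] => []
  | i :: rest => if i = 0 then [] else pyChr i :: relayAltGo rest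

def relay_value_convert_char_fromPV_py_alt (val : List Int) : String :=
  String.mk (relayAltGo val)

-- ===== PRECONDITION & SPEC =====
-- Pre_ admits exactly the inputs where A's chr calls succeed: every element before the first null
-- is a valid codepoint; surrogates (U+D800–U+DFFF), which chr accepts, are excluded too because a
-- Lean Char/String cannot represent them.
def Pre_relay_value_convert_char_fromPV_py (val : List Int) : Prop :=
  ∀ i ∈ val.takeWhile (fun x => x != 0),
    0 ≤ i ∧ i ≤ 1114111 ∧ ¬(55296 ≤ i ∧ i ≤ 57343)
instance (val : List Int) : Decidable (Pre_relay_value_convert_char_fromPV_py val) := by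
  unfold Pre_relay_value_convert_char_fromPV_py; infer_instance

def pvWitness_relay_value_convert_char_fromPV_py : List Int := [72, 105, 0, 33]

def Spec_relay_value_convert_char_fromPV_py (val : List Int) (out : String) : Prop := out = relay_value_convert_char_fromPV_py_alt val
instance (val : List Int) (out : String) : Decidable (Spec_relay_value_convert_char_fromPV_py val out) := by unfold Spec_relay_value_convert_char_fromPV_py; infer_instance

-- ===== CLAIM (what is proved, stated in full; the proofs are below) =====
def Claim_equal_relay_value_convert_char_fromPV_py : Prop := ∀ (val : List Int), Dom_relay_value_convert_char_fromPV_py val → Pre_relay_value_convert_char_fromPV_py val → Spec_relay_value_convert_char_fromPV_py val (relay_value_convert_char_fromPV_py val)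

-- ===== LEMMAS AND PROOFS =====

lemma relay_lists_eq (val : List Int) :
    (match PySem.List.index? val 0 with
     | some firstnull => (PySem.List.slice val none (some (firstnull : Int))).map pyChr
     | none => val.map pyChr) = relayAltGo val := by
  induction val with
  | nil => simp [relayAltGo, PySem.List.index?]
  | cons x rest ih =>
    by_cases hx : x = 0
    · subst hx
      rw [PySem.List.index?_cons_self]
      have h0 := PySem.List.slice_to_natCast (0 :: rest) 0
      simp only [Nat.cast_zero] at h0
      simp [relayAltGo, h0]
    · rw [PySem.List.index?_cons_of_ne rest hx]
      cases h : PySem.List.index? rest 0 with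
      | none =>
          simp only [h, Option.map_none] at *
          simp [relayAltGo, hx, ← ih]
      | some f =>
          simp only [h, Option.map_some] at *
          have h1 := PySem.List.slice_to_natCast (x :: rest) (f + 1)
          have h2 := PySem.List.slice_to_natCast rest f
          rw [h1]; rw [h2] at ih
          simp [relayAltGo, hx, List.take_succ_cons, ← ih]

-- ===== VERDICT (by name: the statement is the Claim_ definition above) =====
theorem relay_value_convert_char_fromPV_py_spec : Claim_equal_relay_value_convert_char_fromPV_py := by
  intro val _ _
  unfold Spec_relay_value_convert_char_fromPV_py
  unfold relay_value_convert_char_fromPV_py relay_value_convert_char_fromPV_py_alt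
  rw [← relay_lists_eq val]
  cases PySem.List.index? val 0 <;> rfl
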